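-- pv_equiv track=rewrite | github.com/Fr0dr1k/programmering_1DL042 | labb4/u3.py | remove_html_code
-- ===== SOURCE A (Python) =====
-- def remove_html_code(source_code_string, at_symbol):
--     all_lines = set()
--
--     for line in source_code_string.split("\n"):
--         remove_start_stop = []
--
--         if at_symbol not in line:
--             continue
--
--         if "mailto:" in line:
--             index_of_mailto = line.find("mailto:")
--             all_lines.add(line[index_of_mailto:line.find("\"", index_of_mailto)])
--
--         for i in range(len(line)):
--             if line[i] == "<":
--                 remove_start_stop.append(i)
--             elif line[i] == ">":
--                 remove_start_stop.append(i)
--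
--         for i in range(len(remove_start_stop)-1,-1,-2):
--
--             line = line[0:remove_start_stop[i-1]]+line[remove_start_stop[i]+1:]
--
--         if at_symbol in line:
--             all_lines.add(line)
--
--     return all_lines
-- ===== SOURCE B (Python) =====
-- def remove_html_code(source_code_string, at_symbol):
--     all_lines = set()
--     for line in source_code_string.split("\n"):
--         if at_symbol not in line:
--             continue
--         if "mailto:" in line:
--             i = line.find("mailto:")
--             all_lines.add(line[i:line.find("\"", i)])
--         kept = []
--         inside = False
--         for ch in line:
--             if ch == "<" or ch == ">":
--                 inside = not inside
--             elif not inside: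
--                 kept.append(ch)
--         cleaned = "".join(kept)
--         if at_symbol in cleaned:
--             all_lines.add(cleaned)
--     return all_lines
-- ===== Notes on version B (the rewrite author's own statement) =====
-- stated objective: alternative
-- what changed: A collects all '<'/'>' positions per line and then repeatedly re-slices and concatenates the whole line, one splice per delimiter pair from right to left; B cleans each line in one left-to-right scan that toggles an inside-tag flag and keeps characters outside tag regions. Pre_ excludes inputs where some at_symbol-containing line has an odd number of '<'/'>' delimiters: such a line is malformed (an unpaired delimiter), nothing is specified there, and A's wrapped final splice and B's strip-to-end-of-line make different, equally arbitrary choices.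
-- outside the precondition, e.g. on remove_html_code('a@<b', '@'): A returns {'a@b'}, B returns {'a@'}; on remove_html_code('<a>@<x', '@'): A returns set(), B returns {'@'}
import Mathlib
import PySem

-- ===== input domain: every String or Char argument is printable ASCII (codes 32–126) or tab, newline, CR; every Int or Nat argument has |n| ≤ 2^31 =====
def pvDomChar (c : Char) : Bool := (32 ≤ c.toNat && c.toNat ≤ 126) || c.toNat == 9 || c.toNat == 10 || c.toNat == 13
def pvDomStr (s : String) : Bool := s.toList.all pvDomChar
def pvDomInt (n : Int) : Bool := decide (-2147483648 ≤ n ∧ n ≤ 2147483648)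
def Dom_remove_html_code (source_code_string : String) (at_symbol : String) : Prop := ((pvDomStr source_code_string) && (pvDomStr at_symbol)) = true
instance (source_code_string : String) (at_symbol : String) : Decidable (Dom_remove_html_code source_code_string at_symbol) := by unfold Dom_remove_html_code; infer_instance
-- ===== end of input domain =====

-- B replaces A's per-line collect-all-marker-positions-then-repeatedly-re-slice pass by a single
-- left-to-right scan that toggles an inside-tag flag and keeps characters outside tag regions;
-- lines with an unpaired '<'/'>' delimiter are excluded by Pre_ (see there).


-- ===== PORT A =====
-- literal transliteration of Source A; the Python set of str is kept as a PySem.Set over the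
-- lines' char lists (insertion order) and rendered to String at the very end
def remove_html_code (source_code_string : String) (at_symbol : String) : List String :=
  ((PySem.Chars.splitOn source_code_string.toList ['\n']).foldl (fun all_lines line =>
    if PySem.Chars.isIn at_symbol.toList line = false then all_lines   -- if at_symbol not in line: continue
    else
      let all_lines :=
        if PySem.Chars.isIn "mailto:".toList line then
          let index_of_mailto := PySem.Chars.find line "mailto:".toList
          PySem.Set.add all_lines
            (PySem.List.slice line (some index_of_mailto)
              (some (PySem.Chars.findFrom line ['"'] index_of_mailto)))
        else all_lines
      -- for i in range(len(line)): collect positions of '<' and '>'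
      let remove_start_stop : List Int :=
        (PySem.List.pyRange 0 (line.length : Int) 1).foldl (fun r i =>
          if PySem.List.pyGet? line i == some '<' then r ++ [i]
          else if PySem.List.pyGet? line i == some '>' then r ++ [i] else r) []
      -- for i in range(len(rss)-1, -1, -2): line = line[0:rss[i-1]] + line[rss[i]+1:]
      let line2 :=
        (PySem.List.pyRange ((remove_start_stop.length : Int) - 1) (-1) (-2)).foldl (fun cur i =>
          PySem.List.slice cur (some 0) (some (PySem.List.pyGetD remove_start_stop (i - 1) 0)) ++
          PySem.List.slice cur (some (PySem.List.pyGetD remove_start_stop i 0 + 1)) none) line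
      if PySem.Chars.isIn at_symbol.toList line2 then PySem.Set.add all_lines line2 else all_lines)
    PySem.Set.empty).map String.ofList

-- ===== PORT B =====
-- Source B: per line one foldl with state (kept, inside); '<'/'>' toggles inside, other chars are
-- kept when outside
def remove_html_code_alt (source_code_string : String) (at_symbol : String) : List String :=
  ((PySem.Chars.splitOn source_code_string.toList ['\n']).foldl (fun all_lines line =>
    if PySem.Chars.isIn at_symbol.toList line = false then all_lines
    else
      let all_lines :=
        if PySem.Chars.isIn "mailto:".toList line then
          let i := PySem.Chars.find line "mailto:".toList
          PySem.Set.add all_lines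
            (PySem.List.slice line (some i) (some (PySem.Chars.findFrom line ['"'] i)))
        else all_lines
      let st := line.foldl (fun (s : List Char × Bool) ch =>
          if ch == '<' || ch == '>' then (s.1, !s.2)
          else if s.2 = false then (s.1 ++ [ch], s.2) else s) ([], false)
      let cleaned := st.1
      if PySem.Chars.isIn at_symbol.toList cleaned then PySem.Set.add all_lines cleaned else all_lines)
    PySem.Set.empty).map String.ofList

-- ===== PRECONDITION & SPEC =====
-- Pre_ excludes inputs where some line containing at_symbol has an ODD number of '<'/'>'
-- delimiters: such a line is malformed (an unpaired delimiter), no behaviour is specified for it,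
-- and A's pair-up-the-delimiter-positions splice and B's toggle scan make different, equally
-- arbitrary choices there (A's last splice wraps to a negative index), so neither value is the one
-- to match.
def Pre_remove_html_code (source_code_string : String) (at_symbol : String) : Prop :=
  ∀ line ∈ PySem.Chars.splitOn source_code_string.toList ['\n'],
    PySem.Chars.isIn at_symbol.toList line = true →
    (line.filter (fun c => c == '<' || c == '>')).length % 2 = 0
instance (source_code_string : String) (at_symbol : String) : Decidable (Pre_remove_html_code source_code_string at_symbol) := by unfold Pre_remove_html_code; infer_instance
def pvWitness_remove_html_code : String × String := ("x@<i>y\nno ats here", "@")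
def Spec_remove_html_code (source_code_string : String) (at_symbol : String) (out : List String) : Prop := out = remove_html_code_alt source_code_string at_symbol
instance (source_code_string : String) (at_symbol : String) (out : List String) : Decidable (Spec_remove_html_code source_code_string at_symbol out) := by unfold Spec_remove_html_code; infer_instance

-- ===== CLAIM (what is proved, stated in full; the proofs are below) =====
def Claim_equal_remove_html_code : Prop := ∀ (source_code_string : String) (at_symbol : String), Dom_remove_html_code source_code_string at_symbol → Pre_remove_html_code source_code_string at_symbol → Spec_remove_html_code source_code_string at_symbol (remove_html_code source_code_string at_symbol)

-- ===== LEMMAS AND PROOFS =====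
def pvMk (c : Char) : Bool := c == '<' || c == '>'

-- removing the closed spans [a,b] (indices into the ORIGINAL l), cursor at i
def pvRem (i : Nat) : List Nat → List Char → List Char
  | [], l => l.drop i
  | [a], l => (l.drop i).take (a - i) ++ l.drop (a + 1)
  | a :: b :: rest, l => (l.drop i).take (a - i) ++ pvRem (b + 1) rest l

theorem pvTakeSplit (l : List Char) (i j a : Nat) (hij : i ≤ j) (hja : j ≤ a) :
    (l.drop i).take (a - i) = (l.drop i).take (j - i) ++ (l.drop j).take (a - j) := by
  have h1 : a - i = (j - i) + (a - j) := by omega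
  rw [h1, List.take_add]
  congr 2
  rw [List.drop_drop]
  congr 1
  omega

theorem pvRem_split (i j : Nat) (qs : List Nat) (l : List Char)
    (hij : i ≤ j) (hq : ∀ x ∈ qs, j ≤ x) :
    pvRem i qs l = (l.drop i).take (j - i) ++ pvRem j qs l := by
  match qs with
  | [] =>
    simp only [pvRem]
    conv_lhs => rw [← List.take_append_drop (j - i) (l.drop i)]
    congr 1
    rw [List.drop_drop]
    congr 1
    omega
  | [a] =>
    have ha : j ≤ a := hq a (by simp)
    simp only [pvRem]
    rw [pvTakeSplit l i j a hij ha, List.append_assoc]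
  | a :: b :: rest =>
    have ha : j ≤ a := hq a (by simp)
    simp only [pvRem]
    rw [pvTakeSplit l i j a hij ha, List.append_assoc]

def pvSegs : List Nat → List Char → List Char
  | [], l => l
  | [a], l => l.take a ++ l.drop (a + 1)
  | a :: b :: rest, l => (pvSegs rest l).take a ++ (pvSegs rest l).drop (b + 1)

theorem pvSegs_eq_pvRem (ps : List Nat) (l : List Char)
    (hs : ps.Pairwise (· < ·)) (hb : ∀ x ∈ ps, x < l.length) :
    pvSegs ps l = pvRem 0 ps l := by
  induction ps, l using pvSegs.induct with
  | case1 => simp [pvSegs, pvRem]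
  | case2 a l => simp [pvSegs, pvRem]
  | case3 a b rest l ih =>
    have hab : a < b := (List.pairwise_cons.mp hs).1 b (by simp)
    have hrest : ∀ x ∈ rest, b + 1 ≤ x := by
      intro x hx
      have := (List.pairwise_cons.mp (List.pairwise_cons.mp hs).2).1 x hx
      omega
    have hblen : b < l.length := hb b (by simp)
    have ihr := ih (by
        have := (List.pairwise_cons.mp (List.pairwise_cons.mp hs).2).2
        exact this)
      (fun x hx => hb x (by simp [hx]))
    have hsplit := pvRem_split 0 (b + 1) rest l (by omega) hrest
    simp only [pvSegs, pvRem, ihr, hsplit]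
    simp only [List.drop_zero, Nat.sub_zero]
    have hlen : (l.take (b + 1)).length = b + 1 := by
      rw [List.length_take]
      omega
    congr 1
    · rw [List.take_append_of_le_length (by omega), List.take_take]
      congr 1
      omega
    · rw [List.drop_left' hlen]

def pvP (l : List Char) (j : Nat) : Bool := l.getD j ' ' == '<' || l.getD j ' ' == '>'
def pvPos (l : List Char) : List Nat := (List.range l.length).filter (pvP l)

theorem pvRss_eq (l : List Char) :
    (PySem.List.pyRange 0 (l.length : Int) 1).foldl (fun r i =>
        if PySem.List.pyGet? l i == some '<' then r ++ [i]
        else if PySem.List.pyGet? l i == some '>' then r ++ [i] else r) [] =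
      (pvPos l).map (fun (n : Nat) => (n : Int)) := by
  rw [PySem.List.pyRange_zero_natCast, List.foldl_map]
  rw [PySem.List.foldl_congr_mem _ _
      (fun (r : List Int) (j : Nat) => if pvP l j then r ++ [(j : Int)] else r) _ ?_]
  · rw [PySem.List.foldl_append_if (pvP l) (fun (n : Nat) => (n : Int))]
    simp [pvPos]
  · intro acc j hj
    rw [List.mem_range] at hj
    have : PySem.List.pyGet? l (j : Int) = some l[j] := by
      rw [PySem.List.pyGet?_natCast]
      exact List.getElem?_eq_getElem hj
    rw [this]
    have hg : l.getD j ' ' = l[j] := List.getD_eq_getElem l ' ' hj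
    simp only [pvP, hg]
    by_cases h1 : l[j] = '<'
    · simp [h1]
    · by_cases h2 : l[j] = '>' <;> simp [h1, h2]

theorem pvGetD_cons2 (x y : Int) (xs : List Int) (m : Int) (hm : 0 ≤ m) :
    PySem.List.pyGetD (x :: y :: xs) (m + 2) 0 = PySem.List.pyGetD xs m 0 := by
  obtain ⟨n, rfl⟩ := Int.eq_ofNat_of_zero_le hm
  have h2 : (n : Int) + 2 = ((n + 2 : Nat) : Int) := by push_cast; ring
  rw [h2, PySem.List.pyGetD_natCast, PySem.List.pyGetD_natCast]
  simp [List.getD]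

theorem pvRangeDesc (L : Nat) :
    PySem.List.pyRange ((L : Int) - 1) (-1) (-2) =
      List.map (fun (j : Nat) => (L : Int) - 1 - 2 * (j : Int)) (List.range ((L + 1) / 2)) := by
  simp only [PySem.List.pyRange]
  rw [if_neg (by norm_num : ¬ (-2 : Int) = 0), if_neg (by norm_num : ¬ (0 : Int) < -2)]
  have hc : (if (-1 : Int) < (L : Int) - 1 then (((L : Int) - 1 - -1 + - -2 - 1) / - -2).toNat else 0)
      = (L + 1) / 2 := by
    split_ifs with h
    · have h1 : ((L : Int) - 1 - -1 + - -2 - 1) = ((L + 1 : Nat) : Int) := by push_cast; ring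
      have h2 : (- -2 : Int) = ((2 : Nat) : Int) := by norm_num
      rw [h1, h2, ← Int.natCast_div, Int.toNat_natCast]
    · omega
  rw [hc]
  apply List.map_congr_left
  intro j hj
  ring

theorem pvSplice_eq_pvSegs (ps : List Nat) (l : List Char)
    (h : ps.length % 2 = 0 ∨ ps.length = 1) :
    (PySem.List.pyRange (((ps.map (fun (n : Nat) => (n : Int))).length : Int) - 1) (-1) (-2)).foldl
        (fun cur i =>
          PySem.List.slice cur (some 0)
              (some (PySem.List.pyGetD (ps.map (fun (n : Nat) => (n : Int))) (i - 1) 0)) ++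
            PySem.List.slice cur
              (some (PySem.List.pyGetD (ps.map (fun (n : Nat) => (n : Int))) i 0 + 1)) none) l =
      pvSegs ps l := by
  induction ps, l using pvSegs.induct with
  | case1 l =>
    simp [PySem.List.pyRange, pvSegs]
  | case2 a l =>
    simp only [List.length_map, List.length_singleton]
    rw [pvRangeDesc 1]
    norm_num
    have h1 : PySem.List.pyGetD [((a : Nat) : Int)] (-1) 0 = (a : Int) := by
      simp [PySem.List.pyGetD, PySem.List.pyGet?, PySem.List.pyIdx?]
    have h2 : PySem.List.pyGetD [((a : Nat) : Int)] 0 0 = (a : Int) := by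
      simp [PySem.List.pyGetD, PySem.List.pyGet?, PySem.List.pyIdx?]
    rw [h1]
    rw [PySem.List.slice_to l (by omega : (0:Int) ≤ (a : Int))]
    rw [PySem.List.slice_from l (by omega : (0:Int) ≤ (a : Int) + 1)]
    have e1 : ((a : Int)).toNat = a := by omega
    have e2 : ((a : Int) + 1).toNat = a + 1 := by omega
    rw [e1, e2]
    simp [pvSegs]
  | case3 a b rest l ih =>
    have hrl : rest.length % 2 = 0 := by
      simp only [List.length_cons] at h
      omega
    simp only [List.map_cons, List.length_map, List.length_cons]
    rw [pvRangeDesc (rest.length + 1 + 1)]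
    have hcnt : (rest.length + 1 + 1 + 1) / 2 = rest.length / 2 + 1 := by omega
    rw [hcnt, List.range_succ, List.map_append, List.foldl_append]
    simp only [List.map_cons, List.map_nil, List.foldl_cons, List.foldl_nil]
    have hih := ih (Or.inl hrl)
    simp only [List.length_map] at hih
    rw [pvRangeDesc rest.length] at hih
    have hcnt2 : (rest.length + 1) / 2 = rest.length / 2 := by omega
    rw [hcnt2] at hih
    rw [List.foldl_map] at hih ⊢
    rw [PySem.List.foldl_congr_mem _ _
        (fun (cur : List Char) (j : Nat) =>
          PySem.List.slice cur (some 0)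
              (some (PySem.List.pyGetD (rest.map (fun (n : Nat) => (n : Int))) ((rest.length : Int) - 1 - 2 * (j : Int) - 1) 0)) ++
            PySem.List.slice cur
              (some (PySem.List.pyGetD (rest.map (fun (n : Nat) => (n : Int))) ((rest.length : Int) - 1 - 2 * (j : Int)) 0 + 1)) none)
        _ ?_]
    · rw [hih]
      have e1 : ((rest.length + 1 + 1 : Nat) : Int) - 1 - 2 * ((rest.length / 2 : Nat) : Int) = 1 := by omega
      rw [e1]
      have g0 : PySem.List.pyGetD ((a : Int) :: (b : Int) :: rest.map (fun (n : Nat) => (n : Int))) (1 - 1) 0 = (a : Int) := by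
        rw [show (1 - 1 : Int) = ((0 : Nat) : Int) from rfl, PySem.List.pyGetD_natCast]
        rfl
      have g1 : PySem.List.pyGetD ((a : Int) :: (b : Int) :: rest.map (fun (n : Nat) => (n : Int))) 1 0 = (b : Int) := by
        rw [show (1 : Int) = ((1 : Nat) : Int) from rfl, PySem.List.pyGetD_natCast]
        rfl
      rw [g0, g1]
      rw [PySem.List.slice_zero_start]
      rw [PySem.List.slice_to (pvSegs rest l) (by omega : (0:Int) ≤ (a : Int))]
      rw [PySem.List.slice_from (pvSegs rest l) (by omega : (0:Int) ≤ (b : Int) + 1)]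
      have e2 : ((a : Int)).toNat = a := by omega
      have e3 : ((b : Int) + 1).toNat = b + 1 := by omega
      rw [e2, e3]
      simp [pvSegs]
    · intro cur j hj
      rw [List.mem_range] at hj
      have hj2 : 2 * j + 2 ≤ rest.length := by omega
      have hm : (0 : Int) ≤ (rest.length : Int) - 1 - 2 * (j : Int) - 1 := by omega
      have ha1 : ((rest.length + 1 + 1 : Nat) : Int) - 1 - 2 * (j : Int) - 1
          = ((rest.length : Int) - 1 - 2 * (j : Int) - 1) + 2 := by push_cast; ring
      have ha2 : ((rest.length + 1 + 1 : Nat) : Int) - 1 - 2 * (j : Int)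
          = ((rest.length : Int) - 1 - 2 * (j : Int)) + 2 := by push_cast; ring
      rw [ha1, ha2, pvGetD_cons2 _ _ _ _ hm, pvGetD_cons2 _ _ _ _ (by omega)]

-- B's toggle scan as a structural recursion: outside / inside a tag region
mutual
def pvStrip : List Char → List Char
  | [] => []
  | c :: cs => if pvMk c then pvSkip cs else c :: pvStrip cs
def pvSkip : List Char → List Char
  | [] => []
  | c :: cs => if pvMk c then pvStrip cs else pvSkip cs
end

theorem pvFoldStrip (l : List Char) : ∀ (acc : List Char) (b : Bool),
    (l.foldl (fun (s : List Char × Bool) ch =>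
      if ch == '<' || ch == '>' then (s.1, !s.2)
      else if s.2 = false then (s.1 ++ [ch], s.2) else s) (acc, b)).1
    = acc ++ (if b then pvSkip l else pvStrip l) := by
  induction l with
  | nil => intro acc b; cases b <;> simp [pvStrip, pvSkip]
  | cons c cs ih =>
    intro acc b
    simp only [List.foldl_cons]
    by_cases hm : (c == '<' || c == '>') = true
    · rw [if_pos hm, ih acc (!b)]
      have hmk : pvMk c = true := hm
      cases b <;> simp [pvStrip, pvSkip, hmk]
    · rw [if_neg hm]
      have hmk : pvMk c = false := by simpa [pvMk] using hm
      cases b with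
      | true => rw [if_neg (by simp)] ; rw [ih acc true] ; simp [pvSkip, hmk]
      | false => rw [if_pos rfl] ; rw [ih (acc ++ [c]) false] ; simp [pvStrip, hmk]

theorem pvPos_nil : pvPos [] = [] := by simp [pvPos]

theorem pvPos_cons (c : Char) (cs : List Char) :
    pvPos (c :: cs) = (if pvMk c then [0] else []) ++ (pvPos cs).map (· + 1) := by
  unfold pvPos
  rw [List.length_cons, List.range_succ_eq_map, List.filter_cons]
  have h0 : pvP (c :: cs) 0 = pvMk c := rfl
  rw [h0, List.filter_map]
  have hc : (pvP (c :: cs)) ∘ (· + 1) = pvP cs := by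
    funext j
    simp [pvP, Function.comp]
  rw [hc]
  cases hm : pvMk c <;> simp

theorem pvPos_len (l : List Char) : (pvPos l).length = (l.filter pvMk).length := by
  induction l with
  | nil => simp [pvPos_nil]
  | cons c cs ih =>
    rw [pvPos_cons, List.filter_cons]
    cases hm : pvMk c <;> simp [ih]

theorem pvRem_shift : ∀ (ps : List Nat) (i : Nat) (c : Char) (l : List Char),
    pvRem (i + 1) (ps.map (· + 1)) (c :: l) = pvRem i ps l
  | [], i, c, l => by simp [pvRem]
  | [a], i, c, l => by
      simp only [List.map_cons, List.map_nil, pvRem, List.drop_succ_cons]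
      have h : a + 1 - (i + 1) = a - i := by omega
      rw [h]
  | a :: b :: rest, i, c, l => by
      simp only [List.map_cons, pvRem, List.drop_succ_cons]
      rw [show b + 1 + 1 = (b + 1) + 1 from rfl, pvRem_shift rest (b + 1) c l]
      have h : a + 1 - (i + 1) = a - i := by omega
      rw [h]

theorem pvRem_zero_shift (ps : List Nat) (c : Char) (l : List Char) :
    pvRem 0 (ps.map (· + 1)) (c :: l) = c :: pvRem 0 ps l := by
  match ps with
  | [] => simp [pvRem]
  | [a] =>
      simp only [List.map_cons, List.map_nil, pvRem, List.drop_zero, Nat.sub_zero,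
        List.take_succ_cons, List.drop_succ_cons, List.cons_append]
  | a :: b :: rest =>
      simp only [List.map_cons, pvRem, List.drop_zero, Nat.sub_zero, List.take_succ_cons,
        List.cons_append]
      rw [show b + 1 + 1 = (b + 1) + 1 from rfl, pvRem_shift rest (b + 1) c l]

theorem pvStripSkip (l : List Char) :
    ((pvPos l).length % 2 = 0 → pvStrip l = pvRem 0 (pvPos l) l) ∧
    (∀ b rest, pvPos l = b :: rest → rest.length % 2 = 0 →
      pvSkip l = pvRem (b + 1) rest l) := by
  induction l with
  | nil =>
    constructor
    · intro _; simp [pvPos_nil, pvStrip, pvRem]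
    · intro b rest h; rw [pvPos_nil] at h; exact absurd h (by simp)
  | cons c cs ih =>
    obtain ⟨ih1, ih2⟩ := ih
    by_cases hm : pvMk c = true
    · have hpos : pvPos (c :: cs) = 0 :: (pvPos cs).map (· + 1) := by
        rw [pvPos_cons, hm]; rfl
      constructor
      · intro he
        rw [hpos] at he
        simp only [List.length_cons, List.length_map] at he
        cases hcs : pvPos cs with
        | nil => rw [hcs] at he; simp at he
        | cons b' rest' =>
          have hre : rest'.length % 2 = 0 := by
            rw [hcs] at he; simp at he; omega
          have hskip := ih2 b' rest' hcs hre
          rw [hpos, hcs]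
          simp only [List.map_cons, pvRem, List.drop_zero, Nat.sub_zero, List.take_zero,
            List.nil_append]
          rw [show b' + 1 + 1 = (b' + 1) + 1 from rfl, pvRem_shift rest' (b' + 1) c cs]
          simp only [pvStrip, hm, if_pos]
          exact hskip
      · intro b rest heq hre
        rw [hpos] at heq
        obtain ⟨hb, hrest⟩ := List.cons.injEq .. ▸ heq
        have hb0 : b = 0 := hb.symm
        have hrest' : rest = (pvPos cs).map (· + 1) := hrest.symm
        have he : (pvPos cs).length % 2 = 0 := by
          rw [hrest'] at hre; simpa using hre
        subst hb0; rw [hrest']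
        rw [show (0 : Nat) + 1 = 0 + 1 from rfl, pvRem_shift (pvPos cs) 0 c cs]
        simp only [pvSkip, hm, if_pos]
        exact ih1 he
    · have hmf : pvMk c = false := by simpa using hm
      have hpos : pvPos (c :: cs) = (pvPos cs).map (· + 1) := by
        rw [pvPos_cons, hmf]; rfl
      constructor
      · intro he
        rw [hpos] at he
        simp only [List.length_map] at he
        rw [hpos, pvRem_zero_shift]
        simp only [pvStrip, hmf]
        simp [ih1 he]
      · intro b rest heq hre
        rw [hpos] at heq
        cases hcs : pvPos cs with
        | nil => rw [hcs] at heq; simp at heq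
        | cons b' rest'' =>
          rw [hcs, List.map_cons] at heq
          obtain ⟨hb, hrest⟩ := List.cons.injEq .. ▸ heq
          have hre'' : rest''.length % 2 = 0 := by
            rw [← hrest] at hre; simpa using hre
          rw [← hb, ← hrest]
          rw [show b' + 1 + 1 = (b' + 1) + 1 from rfl, pvRem_shift rest'' (b' + 1) c cs]
          simp only [pvSkip, hmf]
          simp [ih2 b' rest'' hcs hre'']

-- per-line: on a line with an even number of markers A's splice loop equals B's toggle scan
theorem pvLine_eq (l : List Char) (he : (l.filter (fun c => c == '<' || c == '>')).length % 2 = 0) :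
    (PySem.List.pyRange ((((PySem.List.pyRange 0 (l.length : Int) 1).foldl (fun r i =>
          if PySem.List.pyGet? l i == some '<' then r ++ [i]
          else if PySem.List.pyGet? l i == some '>' then r ++ [i] else r) []).length : Int) - 1)
        (-1) (-2)).foldl (fun cur i =>
          PySem.List.slice cur (some 0)
              (some (PySem.List.pyGetD ((PySem.List.pyRange 0 (l.length : Int) 1).foldl (fun r i =>
                if PySem.List.pyGet? l i == some '<' then r ++ [i]
                else if PySem.List.pyGet? l i == some '>' then r ++ [i] else r) []) (i - 1) 0)) ++
            PySem.List.slice cur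
              (some (PySem.List.pyGetD ((PySem.List.pyRange 0 (l.length : Int) 1).foldl (fun r i =>
                if PySem.List.pyGet? l i == some '<' then r ++ [i]
                else if PySem.List.pyGet? l i == some '>' then r ++ [i] else r) []) i 0 + 1)) none) l =
      (l.foldl (fun (s : List Char × Bool) ch =>
        if ch == '<' || ch == '>' then (s.1, !s.2)
        else if s.2 = false then (s.1 ++ [ch], s.2) else s) ([], false)).1 := by
  have hev : (pvPos l).length % 2 = 0 := by
    rw [pvPos_len]
    simpa [pvMk] using he
  rw [pvRss_eq l]
  have hsort : (pvPos l).Pairwise (· < ·) := List.Pairwise.filter _ List.pairwise_lt_range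
  have hbnd : ∀ x ∈ pvPos l, x < l.length := by
    intro x hx
    simp only [pvPos, List.mem_filter, List.mem_range] at hx
    exact hx.1
  rw [pvSplice_eq_pvSegs (pvPos l) l (Or.inl hev)]
  rw [pvSegs_eq_pvRem (pvPos l) l hsort hbnd]
  rw [pvFoldStrip l [] false]
  simp only [if_neg Bool.false_ne_true, List.nil_append]
  exact ((pvStripSkip l).1 hev).symm

-- ===== VERDICT (by name: the statements are the Claim_ definitions above) =====
theorem remove_html_code_spec : Claim_equal_remove_html_code := by
  intro s a _hdom hpre
  show remove_html_code s a = remove_html_code_alt s a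
  unfold remove_html_code remove_html_code_alt
  congr 1
  apply PySem.List.foldl_congr_mem
  intro acc line hline
  dsimp only []
  by_cases hin : PySem.Chars.isIn a.toList line = false
  · rw [if_pos hin, if_pos hin]
  · rw [if_neg hin, if_neg hin]
    have hintrue : PySem.Chars.isIn a.toList line = true := by
      cases h : PySem.Chars.isIn a.toList line
      · exact absurd h hin
      · rfl
    rw [pvLine_eq line (hpre line hline hintrue)]
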